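-- pv_equiv track=rewrite | github.com/lxfz/leetcode-python | cj1.py | calCost
-- ===== SOURCE A (Python) =====
-- def reverse(arr, i, j):
--   while(i < j):
--     tmp = arr[i]
--     arr[i] = arr[j]
--     arr[j] = tmp
--     i += 1
--     j -= 1
--
-- def calCost(arr):
--   ans = 0
--   for i in range(len(arr) - 1):
--     min_pos = i
--     for j in range(i, len(arr)):
--       if arr[j] < arr[min_pos]:
--         min_pos = j
--     reverse(arr, i, min_pos)
--     ans = ans + min_pos - i + 1
--   return ans
-- ===== SOURCE B (Python) =====
-- def calCost(arr):
--     L = list(arr)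
--     total = 0
--     while len(L) > 1:
--         k = L.index(min(L))
--         total += k + 1
--         L = L[:k][::-1] + L[k + 1:]
--     return total
-- ===== Notes on version B (the rewrite author's own statement) =====
-- stated objective: alternative
-- what changed: A runs an in-place selection pass over a fixed array (interpreted inner index scan for the argmin, then an element-by-element swap reversal); B instead peels a shrinking list: k = L.index(min(L)), add k+1, and rebuild the remainder as L[:k][::-1] + L[k+1:], never mutating the input.
import Mathlib
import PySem

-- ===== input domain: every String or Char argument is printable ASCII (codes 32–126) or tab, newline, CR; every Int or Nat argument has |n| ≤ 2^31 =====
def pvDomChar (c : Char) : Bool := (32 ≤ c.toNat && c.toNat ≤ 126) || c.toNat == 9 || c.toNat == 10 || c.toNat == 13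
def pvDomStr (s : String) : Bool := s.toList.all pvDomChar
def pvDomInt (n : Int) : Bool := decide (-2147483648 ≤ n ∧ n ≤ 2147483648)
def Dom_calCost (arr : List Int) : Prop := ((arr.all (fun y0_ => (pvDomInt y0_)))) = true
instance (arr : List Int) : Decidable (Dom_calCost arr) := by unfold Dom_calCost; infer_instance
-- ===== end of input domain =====

-- B replaces A's in-place selection loop over a fixed array by a shrinking-list peel
-- (index of the first minimum, then rebuild the remaining list by slicing); objective:
-- alternative decomposition, same cost. NOTE: Python A sorts its argument IN PLACE; the
-- equivalence proved here is about the RETURN value only (B leaves its argument untouched).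

-- ===== PORT A =====
-- arr[i] = v ; every call site of A keeps i nonnegative and in range (exact there)
def pySetI (xs : List Int) (i : Int) (v : Int) : List Int :=
  if 0 ≤ i then xs.set i.toNat v else xs

-- the helper 'reverse(arr, i, j)' (while i < j: swap arr[i], arr[j])
def revLoop (arr : List Int) (i j : Int) : List Int :=
  if i < j then
    let tmp := PySem.List.pyGetD arr i 0
    let a1 := pySetI arr i (PySem.List.pyGetD arr j 0)
    let a2 := pySetI a1 j tmp
    revLoop a2 (i + 1) (j - 1)
  else arr
termination_by (j - i).toNat
decreasing_by omega

-- the body of A's outer 'for i in range(len(arr) - 1)' loop; state = (arr, ans)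
def stepA (st : List Int × Int) (i : Int) : List Int × Int :=
  let a := st.1
  let minPos := (PySem.List.pyRange i (a.length : Int) 1).foldl
    (fun mp j => if PySem.List.pyGetD a j 0 < PySem.List.pyGetD a mp 0 then j else mp) i
  (revLoop a i minPos, st.2 + minPos - i + 1)

def calCost (arr : List Int) : Int :=
  ((PySem.List.pyRange 0 ((arr.length : Int) - 1) 1).foldl stepA (arr, 0)).2

-- ===== PORT B =====
-- L[:k][::-1] + L[k+1:]  (cited by peelLoop's termination proof)
theorem peelSlices_eq (L : List Int) (k : Nat) :
    ((PySem.List.slice? (PySem.List.slice L none (some (k : Int))) none none (-1)).getD [])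
      ++ PySem.List.slice L (some ((k : Int) + 1)) none
    = (L.take k).reverse ++ L.drop (k + 1) := by
  have h1 : ((k : Int) + 1) = ((k + 1 : Nat) : Int) := by push_cast; ring
  rw [PySem.List.slice_to_natCast, PySem.List.slice?_none_none_neg_one, h1,
    PySem.List.slice_from_natCast]
  rfl

-- the 'while len(L) > 1' loop of B; total is the accumulator
def peelLoop (L : List Int) (total : Int) : Int :=
  if 1 < L.length then
    match _hm : PySem.List.min? L (fun x => x) with
    | none => total      -- unreachable: L is nonempty here
    | some m =>
      match hk : PySem.List.index? L m with
      | none => total    -- unreachable: m ∈ L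
      | some k =>
        peelLoop (((PySem.List.slice? (PySem.List.slice L none (some (k : Int))) none none (-1)).getD [])
                    ++ PySem.List.slice L (some ((k : Int) + 1)) none)
          (total + (k : Int) + 1)
  else total
termination_by L.length
decreasing_by
  rw [peelSlices_eq]
  obtain ⟨hlt, -, -⟩ := PySem.List.getElem_of_index?_eq_some hk
  simp [List.length_take, List.length_drop]
  omega

def calCost_alt (arr : List Int) : Int := peelLoop arr 0

-- ===== PRECONDITION & SPEC =====
def Spec_calCost (arr : List Int) (out : Int) : Prop := out = calCost_alt arr
instance (arr : List Int) (out : Int) : Decidable (Spec_calCost arr out) := by unfold Spec_calCost; infer_instance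

-- ===== CLAIM (what is proved, stated in full; the proofs are below) =====
def Claim_equal_calCost : Prop := ∀ (arr : List Int), Dom_calCost arr → Spec_calCost arr (calCost arr)

-- ===== LEMMAS AND PROOFS =====

-- proof-only model of A's inner argmin scan: v = value at current best index c, s = next position
def selIdx : List Int → Int → Int → Int → Int
  | [], _, c, _ => c
  | x :: xs, v, c, s => if x < v then selIdx xs x s (s + 1) else selIdx xs v c (s + 1)

theorem fold_sel (a : List Int) (n : Nat) : ∀ (s c : Int), 0 ≤ s → a.length - s.toNat = n →
    (PySem.List.pyRange s (a.length : Int) 1).foldl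
      (fun mp j => if PySem.List.pyGetD a j 0 < PySem.List.pyGetD a mp 0 then j else mp) c
    = selIdx (a.drop s.toNat) (PySem.List.pyGetD a c 0) c s := by
  induction n with
  | zero =>
    intro s c hs hn
    have hlen : (a.length : Int) ≤ s := by omega
    rw [PySem.List.pyRange_one_eq_nil hlen]
    have : a.drop s.toNat = [] := by
      apply List.drop_eq_nil_of_le; omega
    rw [this]; rfl
  | succ n ih =>
    intro s c hs hn
    have hslt : s < (a.length : Int) := by omega
    have hsnat : s.toNat < a.length := by omega
    rw [PySem.List.pyRange_one_cons hslt, List.foldl_cons]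
    have hdrop : a.drop s.toNat = a[s.toNat] :: a.drop (s.toNat + 1) :=
      List.drop_eq_getElem_cons hsnat
    have hget : PySem.List.pyGetD a s 0 = a[s.toNat] :=
      PySem.List.pyGetD_eq_getElem (xs := a) (i := s) (d := 0) hs (by exact_mod_cast hslt)
    rw [hdrop]
    show _ = (if a[s.toNat] < PySem.List.pyGetD a c 0 then selIdx (a.drop (s.toNat + 1)) a[s.toNat] s (s+1)
              else selIdx (a.drop (s.toNat + 1)) (PySem.List.pyGetD a c 0) c (s+1))
    have hs1 : (s + 1).toNat = s.toNat + 1 := by omega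
    by_cases hlt : PySem.List.pyGetD a s 0 < PySem.List.pyGetD a c 0
    · rw [if_pos hlt]
      rw [ih (s+1) s (by omega) (by omega), hs1, ← hget]
      rw [if_pos hlt]
    · rw [if_neg hlt]
      rw [ih (s+1) c (by omega) (by omega), hs1]
      rw [if_neg (by rw [← hget]; exact hlt)]

theorem selIdx_min (L : List Int) : ∀ (v c s : Int),
    selIdx L v c s = match PySem.List.min? L (fun y => y) with
      | none => c
      | some m => if m < v then s + (((PySem.List.index? L m).getD 0 : Nat) : Int) else c := by
  induction L with
  | nil =>
    intro v c s
    have h : PySem.List.min? ([] : List Int) (fun y => y) = none :=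
      (PySem.List.min?_eq_none_iff [] (fun y => y)).mpr rfl
    rw [h]; rfl
  | cons x xs ih =>
    intro v c s
    rw [PySem.List.min?_id_cons]
    show (if x < v then selIdx xs x s (s + 1) else selIdx xs v c (s + 1))
       = if xs.foldl min x < v then
           s + (((PySem.List.index? (x :: xs) (xs.foldl min x)).getD 0 : Nat) : Int) else c
    rcases xs with _ | ⟨y, ys⟩
    · -- xs = []
      simp only [List.foldl_nil, selIdx, PySem.List.index?_cons_self]
      split_ifs <;> simp
    · -- xs = y :: ys, nonempty
      set m' : Int := ys.foldl min y with hm'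
      have hmin : PySem.List.min? (y :: ys) (fun z => z) = some m' :=
        PySem.List.min?_id_cons y ys
      have hM : (y :: ys).foldl min x = min x m' := by
        rw [List.foldl_cons, hm']
        exact List.foldl_assoc
      have hmem : m' ∈ y :: ys := PySem.List.min?_mem hmin
      obtain ⟨k, hk⟩ : ∃ k, PySem.List.index? (y :: ys) m' = some k := by
        have := (PySem.List.index?_isSome_iff (xs := y :: ys) (v := m')).mpr hmem
        exact Option.isSome_iff_exists.mp this
      have ih1 := ih x s (s + 1)
      have ih2 := ih v c (s + 1)
      rw [hmin] at ih1 ih2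
      simp only [hk, Option.getD_some] at ih1 ih2
      rw [hM]
      by_cases hmx : m' < x
      · have hMe : min x m' = m' := min_eq_right hmx.le
        have hne : x ≠ m' := ne_of_gt hmx
        have hidx : PySem.List.index? (x :: y :: ys) m'
            = (PySem.List.index? (y :: ys) m').map (· + 1) :=
          PySem.List.index?_cons_of_ne _ hne
        rw [hMe, hidx, hk]
        simp only [Option.map_some, Option.getD_some]
        by_cases hxv : x < v
        · rw [if_pos hxv, ih1, if_pos hmx, if_pos (lt_trans hmx hxv)]
          push_cast; ring
        · rw [if_neg hxv, ih2]
          by_cases hmv : m' < v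
          · rw [if_pos hmv, if_pos hmv]; push_cast; ring
          · rw [if_neg hmv, if_neg hmv]
      · have hMe : min x m' = x := min_eq_left (not_lt.mp hmx)
        rw [hMe, PySem.List.index?_cons_self]
        simp only [Option.getD_some]
        by_cases hxv : x < v
        · rw [if_pos hxv, ih1, if_neg hmx, if_pos hxv]
          push_cast; ring
        · rw [if_neg hxv, ih2, if_neg hxv,
            if_neg (by have := not_lt.mp hmx; have := not_lt.mp hxv; omega)]

theorem pyGetD_append_mid (pre suf : List Int) (x d : Int) :
    PySem.List.pyGetD (pre ++ x :: suf) ((pre.length : Nat) : Int) d = x := by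
  rw [PySem.List.pyGetD_natCast]
  simp [List.getD_eq_getElem?_getD]

theorem set_append_mid (pre suf : List Int) (x v : Int) :
    (pre ++ x :: suf).set pre.length v = pre ++ v :: suf := by
  rw [List.set_append]
  simp

-- in-place swap reversal of a segment equals List.reverse of the segment
theorem revLoop_eq (n : Nat) : ∀ (seg pre post : List Int), seg.length ≤ n →
    revLoop (pre ++ seg ++ post) (pre.length : Int) ((pre.length : Int) + seg.length - 1)
    = pre ++ seg.reverse ++ post := by
  induction n using Nat.strong_induction_on with
  | _ n ih =>
    intro seg pre post hlen
    by_cases hsmall : seg.length ≤ 1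
    · rw [revLoop, if_neg (by omega)]
      rcases seg with _ | ⟨x, t⟩
      · simp
      · rcases t with _ | ⟨z, t'⟩
        · simp
        · simp at hsmall
    · -- seg has at least 2 elements: seg = x :: mid ++ [y]
      rcases seg with _ | ⟨x, t⟩
      · simp at hsmall
      rcases List.eq_nil_or_concat t with rfl | ⟨mid, y, rfl⟩
      · simp at hsmall
      simp only [List.concat_eq_append] at hlen hsmall ⊢
      have hij : (pre.length : Int) < (pre.length : Int) + ((x :: (mid ++ [y])).length : Int) - 1 := by
        simp; omega
      rw [revLoop, if_pos hij]
      dsimp only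
      have hA : pre ++ (x :: (mid ++ [y])) ++ post = pre ++ x :: (mid ++ ([y] ++ post)) := by
        simp
      have hj : (pre.length : Int) + ((x :: (mid ++ [y])).length : Int) - 1
          = (((pre ++ x :: mid).length : Nat) : Int) := by
        simp; ring
      have hgi : PySem.List.pyGetD (pre ++ (x :: (mid ++ [y])) ++ post) (pre.length : Int) 0 = x := by
        rw [hA]; exact pyGetD_append_mid pre (mid ++ ([y] ++ post)) x 0
      have hgj : PySem.List.pyGetD (pre ++ (x :: (mid ++ [y])) ++ post)
          ((pre.length : Int) + ((x :: (mid ++ [y])).length : Int) - 1) 0 = y := by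
        rw [hj]
        have : pre ++ (x :: (mid ++ [y])) ++ post = (pre ++ x :: mid) ++ y :: post := by simp
        rw [this]; exact pyGetD_append_mid (pre ++ x :: mid) post y 0
      have h1 : pySetI (pre ++ (x :: (mid ++ [y])) ++ post) (pre.length : Int) y
          = pre ++ y :: (mid ++ ([y] ++ post)) := by
        rw [hA, pySetI, if_pos (Int.natCast_nonneg _)]
        rw [Int.toNat_natCast]
        exact set_append_mid pre (mid ++ ([y] ++ post)) x y
      have h2 : pySetI (pre ++ y :: (mid ++ ([y] ++ post)))
          ((pre.length : Int) + ((x :: (mid ++ [y])).length : Int) - 1) x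
          = (pre ++ y :: mid) ++ x :: post := by
        rw [hj, pySetI, if_pos (Int.natCast_nonneg _)]
        rw [Int.toNat_natCast]
        have hlen2 : (pre ++ x :: mid).length = (pre ++ y :: mid).length := by simp
        have : pre ++ y :: (mid ++ ([y] ++ post)) = (pre ++ y :: mid) ++ y :: post := by simp
        rw [this, hlen2]
        exact set_append_mid (pre ++ y :: mid) post y x
      rw [hgi, hgj, h1, h2]
      have hstart : (pre.length : Int) + 1 = (((pre ++ [y]).length : Nat) : Int) := by
        simp
      have hend : (pre.length : Int) + ((x :: (mid ++ [y])).length : Int) - 1 - 1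
          = (((pre ++ [y]).length : Nat) : Int) + (mid.length : Int) - 1 := by
        simp; ring
      have hsplit : (pre ++ y :: mid) ++ x :: post = (pre ++ [y]) ++ mid ++ ([x] ++ post) := by
        simp
      rw [hstart, hend, hsplit]
      rw [ih (n - 1) (by simp at hlen ⊢; omega) mid (pre ++ [y]) ([x] ++ post)
        (by simp at hlen ⊢; omega)]
      simp

-- main loop invariant: A's outer fold over the suffix L (behind sorted prefix P) computes peelLoop L ans
theorem outer (fuel : Nat) : ∀ (P L : List Int) (ans : Int), L.length ≤ fuel →
    ((PySem.List.pyRange (P.length : Int) (((P.length : Int) + (L.length : Int)) - 1) 1).foldl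
        stepA (P ++ L, ans)).2
    = peelLoop L ans := by
  induction fuel with
  | zero =>
    intro P L ans hlen
    have hL : L.length = 0 := by omega
    rw [PySem.List.pyRange_one_eq_nil (by omega), peelLoop, if_neg (by omega)]
    rfl
  | succ fuel ih =>
    intro P L ans hlen
    by_cases hsmall : L.length ≤ 1
    · rw [PySem.List.pyRange_one_eq_nil (by omega), peelLoop, if_neg (by omega)]
      rfl
    · have hm2 : 2 ≤ L.length := by omega
      rcases L with _ | ⟨l0, rest⟩
      · simp at hm2
      set L : List Int := l0 :: rest with hLdef
      have hLne : L ≠ [] := by simp [hLdef]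
      -- the first minimum and its first position
      set m' : Int := rest.foldl min l0 with hm'def
      have hmin : PySem.List.min? L (fun z => z) = some m' := PySem.List.min?_id_cons l0 rest
      have hmem : m' ∈ L := PySem.List.min?_mem hmin
      obtain ⟨k, hk⟩ : ∃ k, PySem.List.index? L m' = some k :=
        Option.isSome_iff_exists.mp ((PySem.List.index?_isSome_iff L m').mpr hmem)
      obtain ⟨hklt, hkval, hkfirst⟩ := PySem.List.getElem_of_index?_eq_some hk
      -- the inner argmin fold returns P.length + k
      have hsel : selIdx L l0 (P.length : Int) (P.length : Int) = (P.length : Int) + (k : Int) := by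
        rw [selIdx_min, hmin]
        dsimp only
        by_cases hml : m' < l0
        · rw [if_pos hml, hk]; rfl
        · rw [if_neg hml]
          have h0 : m' = l0 := le_antisymm (PySem.List.min?_isMin hmin l0 (by simp [hLdef]))
            (not_lt.mp hml)
          have : k = 0 := by
            rw [h0, hLdef, PySem.List.index?_cons_self] at hk
            exact (Option.some_inj.mp hk).symm
          simp [this]
      have hinner : (PySem.List.pyRange (P.length : Int) (((P ++ L).length : Nat) : Int) 1).foldl
          (fun mp j => if PySem.List.pyGetD (P ++ L) j 0 < PySem.List.pyGetD (P ++ L) mp 0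
            then j else mp) (P.length : Int)
          = (P.length : Int) + (k : Int) := by
        rw [fold_sel (P ++ L) L.length (P.length : Int) (P.length : Int)
          (Int.natCast_nonneg _) (by simp)]
        rw [Int.toNat_natCast, List.drop_left]
        rw [show PySem.List.pyGetD (P ++ L) ((P.length : Nat) : Int) 0 = l0 from
          pyGetD_append_mid P rest l0 0]
        exact hsel
      -- the reversal step
      set L' : List Int := (L.take k).reverse ++ L.drop (k + 1) with hL'def
      have hrev : revLoop (P ++ L) (P.length : Int) ((P.length : Int) + (k : Int))
          = (P ++ [L[k]]) ++ L' := by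
        have hsegl : (L.take (k + 1)).length = k + 1 := by
          rw [List.length_take]; omega
        have hsplit : P ++ L = P ++ L.take (k + 1) ++ L.drop (k + 1) := by
          rw [List.append_assoc, List.take_append_drop]
        have hjj : (P.length : Int) + (k : Int)
            = (P.length : Int) + ((L.take (k + 1)).length : Int) - 1 := by
          rw [hsegl]; push_cast; ring
        rw [hsplit, hjj, revLoop_eq (k + 1) (L.take (k + 1)) P (L.drop (k + 1)) (by omega)]
        have htk : L.take (k + 1) = L.take k ++ [L[k]] := by
          rw [List.take_add_one, List.getElem?_eq_getElem hklt]; rfl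
        rw [htk]
        simp only [hL'def, List.reverse_append, List.reverse_singleton, List.append_assoc, List.cons_append]
      -- one step of A's outer loop
      have hstep : stepA (P ++ L, ans) (P.length : Int)
          = ((P ++ [L[k]]) ++ L', ans + (k : Int) + 1) := by
        show ((revLoop (P ++ L) (P.length : Int) _, _) : List Int × Int) = _
        rw [hinner, hrev]
        congr 1
        ring
      -- assemble the left side
      have hlt : (P.length : Int) < ((P.length : Int) + (L.length : Int)) - 1 := by
        have : (2 : Int) ≤ (L.length : Int) := by exact_mod_cast hm2
        omega
      rw [PySem.List.pyRange_one_cons hlt, List.foldl_cons, hstep]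
      have hP' : ((P.length : Int) + 1) = (((P ++ [L[k]]).length : Nat) : Int) := by
        simp
      have hL'len : L'.length = L.length - 1 := by
        simp [hL'def]; omega
      have hbound : ((P.length : Int) + (L.length : Int)) - 1
          = (((P ++ [L[k]]).length : Nat) : Int) + ((L'.length : Nat) : Int) - 1 := by
        rw [hL'len]; simp; omega
      have hfle : L'.length ≤ fuel := by rw [hL'len]; simp [hLdef] at hlen hsmall ⊢; omega
      rw [hP', hbound, ih (P ++ [L[k]]) L' (ans + (k : Int) + 1) hfle]
      -- one step of B's peel loop
      conv_rhs => rw [peelLoop]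
      rw [if_pos (by omega)]
      split
      · next heqn => rw [hmin] at heqn; exact absurd heqn (by simp)
      · next mv heqs =>
        rw [hmin] at heqs
        have hmv : mv = m' := (Option.some_inj.mp heqs).symm
        subst hmv
        split
        · next heqn2 => rw [hk] at heqn2; exact absurd heqn2 (by simp)
        · next k2 heqs2 =>
          rw [hk] at heqs2
          have hk2 : k2 = k := (Option.some_inj.mp heqs2).symm
          subst hk2
          rw [peelSlices_eq]

-- ===== VERDICT (by name: the statement is the Claim_ definition above) =====
theorem calCost_spec : Claim_equal_calCost := by
  intro arr _
  unfold Spec_calCost calCost calCost_alt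
  have := outer arr.length [] arr 0 (le_refl _)
  simpa using this
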